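-- pv_equiv track=rewrite | github.com/gukihuman/algorithms-python-hiryanov | Lecture_11_dynamic/4-grass.py | grasshopter
-- ===== SOURCE A (Python) =====
-- def grasshopter(n, prices):
--     """Returns the minimal price of the way to n-position on a road
--     if grasshopper is able to jump only on 1 or 2 steps per move.
--     Also returns the hole path of minimal price with every position in it.
--     Starting from 1-st position. n > 1. Prices starts from 2-nd position."""
--
--     # Check the correctness of n.
--     if n <= 1:
--         return None
--
--     # Finding minimal summary price for each position to achieve.
--     S = [None] * (n + 1)
--     S[0], S[1] = float('inf'), 0
--     for i in range(2, n + 1):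
--         S[i] = min(S[i - 2], S[i - 1]) + prices[i - 2]
--
--     # Finding the path to n-position with minimal summary price. Backwards.
--     i = n
--     path = [n]
--     while i > 1:
--         if S[i - 1] < S[i - 2]:
--             path.append(i - 1)
--             i -= 1
--         else:
--             path.append(i - 2)
--             i -= 2
--
--     # Returning the minimal price for n-position and the path to it.
--     return [S[n], path[::-1]]
-- ===== SOURCE B (Python) =====
-- def grasshopter(n, prices):
--     """Forward one-pass DP that carries the optimal path (as a shared cons chain,
--     last position first) along with the cost, so no S table and no backward
--     reconstruction walk is needed."""
--     if n <= 1: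
--         return None
--     # cost / path-chain to reach position 1 and position 2
--     c2, c1 = 0, prices[0]
--     b2, b1 = (1, None), (2, (1, None))
--     for i in range(3, n + 1):
--         c = min(c2, c1) + prices[i - 2]
--         b = (i, b1 if c1 < c2 else b2)
--         c2, c1, b2, b1 = c1, c, b1, b
--     rev = []
--     node = b1
--     while node is not None:
--         rev.append(node[0])
--         node = node[1]
--     return [c1, rev[::-1]]
-- ===== Notes on version B (the rewrite author's own statement) =====
-- stated objective: alternative
-- what changed: B computes the optimal path forward in the same DP loop, carrying (cost, path-chain) for the last two positions as shared cons chains, instead of A's full S table (with its inf sentinel) followed by a separate backward reconstruction while-loop.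
import Mathlib
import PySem

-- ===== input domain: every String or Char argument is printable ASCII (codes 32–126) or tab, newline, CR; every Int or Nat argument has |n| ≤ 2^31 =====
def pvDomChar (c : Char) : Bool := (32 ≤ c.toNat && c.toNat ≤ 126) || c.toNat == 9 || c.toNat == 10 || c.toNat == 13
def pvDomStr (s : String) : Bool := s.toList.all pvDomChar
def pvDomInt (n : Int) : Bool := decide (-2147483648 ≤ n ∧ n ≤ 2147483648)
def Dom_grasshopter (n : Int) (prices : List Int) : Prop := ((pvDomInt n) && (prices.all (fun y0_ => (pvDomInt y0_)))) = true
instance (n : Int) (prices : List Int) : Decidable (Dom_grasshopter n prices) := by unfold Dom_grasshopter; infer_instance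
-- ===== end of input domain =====

-- B replaces A's S-table + backward reconstruction walk with a single forward DP loop
-- that carries (cost, path) for the last two positions (objective: alternative).


-- ===== PORT A =====
-- Python's float('inf') (only ever stored at S[0]) is ported as `none` in Option Int:
-- in A it is only compared (it wins `<`), min'ed (it loses `min`) and inf+p=inf=vadd none p;
-- every value actually returned is a plain int, so this is exact on Pre_.
def vmin (a b : Option Int) : Option Int :=
  match a, b with
  | none, b => b
  | a, none => a
  | some x, some y => some (min x y)

def vlt (a b : Option Int) : Bool :=
  match a, b with
  | some _, none => true
  | none, _ => false
  | some x, some y => decide (x < y)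

def vadd (a : Option Int) (p : Int) : Option Int := a.map (· + p)

-- The S table for indices 0..k+1 (A preallocates [None]*(n+1) but fills S[i] strictly in
-- order i = 2..n and never reads an unfilled slot, so appending is faithful).
-- prices[i-2] is in range inside Pre_; the getD default 0 is never read there.
def mkS (prices : List Int) : Nat → List (Option Int)
  | 0 => [none, some 0]
  | k+1 =>
      let S := mkS prices k
      S ++ [vadd (vmin (S.getD k none) (S.getD (k+1) none)) (prices.getD k 0)]

-- A's backward reconstruction while-loop (loop variable i as fuel).
def walkA (S : List (Option Int)) (i : Nat) (path : List Int) : List Int :=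
  if 1 < i then
    if vlt (S.getD (i-1) none) (S.getD (i-2) none) then
      walkA S (i-1) (path ++ [(i:Int) - 1])
    else
      walkA S (i-2) (path ++ [(i:Int) - 2])
  else path
termination_by i
decreasing_by all_goals omega

def grasshopter (n : Int) (prices : List Int) : Option (Int × List Int) :=
  if n ≤ 1 then none
  else
    let S := mkS prices (n.toNat - 1)
    match S.getD n.toNat none with
    | some v => some (v, (walkA S n.toNat [n]).reverse)
    | none => none   -- unreachable: S[n] is a plain int for every n ≥ 2

-- ===== PORT B =====
-- prices[i-2] in range inside Pre_; the getD default 0 is never read there.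
-- Source B's cons chains (i, rest)/None are exactly Lean's List Int built by cons.
def stepB (prices : List Int) (st : Int × Int × List Int × List Int) (i : Int) :
    Int × Int × List Int × List Int :=
  let (c2, c1, b2, b1) := st
  let c := min c2 c1 + prices.getD (i-2).toNat 0
  let b := i :: (if c1 < c2 then b1 else b2)
  (c1, c, b1, b)

-- Source B's final while-loop: pop the chain head-first into rev (append per node)
def chainRev (node : List Int) : List Int :=
  node.foldl (fun rev x => rev ++ [x]) []

def grasshopter_alt (n : Int) (prices : List Int) : Option (Int × List Int) :=
  if n ≤ 1 then none
  else
    let st := (PySem.List.pyRange 3 (n+1) 1).foldl (stepB prices)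
      (0, prices.getD 0 0, [(1:Int)], [(2:Int), 1])
    some (st.2.1, (chainRev st.2.2.2).reverse)

-- ===== PRECONDITION & SPEC =====
-- Pre_ excludes exactly the inputs where Python A raises IndexError:
-- n ≥ 2 with fewer than n-1 prices (then prices[i-2] is out of range).
def Pre_grasshopter (n : Int) (prices : List Int) : Prop :=
  n ≤ 1 ∨ n - 1 ≤ (prices.length : Int)
instance (n : Int) (prices : List Int) : Decidable (Pre_grasshopter n prices) := by
  unfold Pre_grasshopter; infer_instance

def pvWitness_grasshopter : Int × List Int := (4, [3, 1, 2])

def Spec_grasshopter (n : Int) (prices : List Int) (out : Option (Int × List Int)) : Prop := out = grasshopter_alt n prices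
instance (n : Int) (prices : List Int) (out : Option (Int × List Int)) : Decidable (Spec_grasshopter n prices out) := by unfold Spec_grasshopter; infer_instance

-- ===== CLAIM (what is proved, stated in full; the proofs are below) =====
def Claim_equal_grasshopter : Prop := ∀ (n : Int) (prices : List Int), Dom_grasshopter n prices → Pre_grasshopter n prices → Spec_grasshopter n prices (grasshopter n prices)

-- ===== LEMMAS AND PROOFS =====

-- Reference cost sequence: Sv j = A's S[j].
def Sv (prices : List Int) : Nat → Option Int
  | 0 => none
  | 1 => some 0
  | k+2 => vadd (vmin (Sv prices k) (Sv prices (k+1))) (prices.getD k 0)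

-- Reference optimal path ending at position j (ascending), A's tie-break (≥ goes 2 back).
def pw (prices : List Int) : Nat → List Int
  | 0 => [0]
  | 1 => [1]
  | k+2 => (if vlt (Sv prices (k+1)) (Sv prices k) then pw prices (k+1) else pw prices k)
             ++ [(k:Int)+2]

theorem Sv_some (prices : List Int) (j : Nat) (hj : 1 ≤ j) :
    Sv prices j = some ((Sv prices j).getD 0) := by
  induction j using Nat.strong_induction_on with
  | _ j ih =>
    match j, hj with
    | 1, _ => rfl
    | (k+2), _ =>
      rw [Sv]
      rw [ih (k+1) (by omega) (by omega)]
      cases Sv prices k <;> simp [vmin, vadd]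

theorem length_mkS (prices : List Int) (k : Nat) : (mkS prices k).length = k + 2 := by
  induction k with
  | zero => rfl
  | succ k ih => simp [mkS, ih]

theorem mkS_getD (prices : List Int) (k j : Nat) (hj : j ≤ k + 1) :
    (mkS prices k).getD j none = Sv prices j := by
  induction k generalizing j with
  | zero =>
    match j, hj with
    | 0, _ => rfl
    | 1, _ => rfl
  | succ k ih =>
    rw [mkS]
    rcases Nat.lt_or_ge j (k+2) with h | h
    · rw [List.getD_append _ _ _ _ (by rw [length_mkS]; omega)]
      exact ih j (by omega)
    · have hj2 : j = k + 2 := by omega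
      subst hj2
      rw [List.getD_append_right _ _ _ _ (by rw [length_mkS])]
      simp only [length_mkS]
      rw [show k + 2 - (k + 2) = 0 by omega]
      simp only [List.getD_cons_zero]
      rw [ih k (by omega), ih (k+1) (by omega)]
      rfl

theorem walkA_acc (S : List (Option Int)) (i : Nat) (acc : List Int) :
    walkA S i acc = acc ++ walkA S i [] := by
  induction i using Nat.strong_induction_on generalizing acc with
  | _ i ih =>
    conv_lhs => rw [walkA]
    conv_rhs => rw [walkA]
    by_cases h : 1 < i
    · simp only [if_pos h]
      by_cases hc : vlt (S.getD (i-1) none) (S.getD (i-2) none) = true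
      · simp only [if_pos hc]
        rw [ih (i-1) (by omega), ih (i-1) (by omega) ([] ++ [(i:Int)-1])]
        simp
      · simp only [if_neg hc]
        rw [ih (i-2) (by omega), ih (i-2) (by omega) ([] ++ [(i:Int)-2])]
        simp
    · simp [h]

theorem walkA_pw (prices : List Int) (m : Nat) (i : Nat) (hi : i ≤ m) :
    (walkA (mkS prices (m-1)) i []).reverse ++ [(i:Int)] = pw prices i := by
  induction i using Nat.strong_induction_on with
  | _ i ih =>
    match i, hi with
    | 0, _ => rw [walkA]; rfl
    | 1, _ => rw [walkA]; rfl
    | (k+2), hi =>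
      have h1 : (mkS prices (m-1)).getD (k+1) none = Sv prices (k+1) :=
        mkS_getD _ _ _ (by omega)
      have h2 : (mkS prices (m-1)).getD k none = Sv prices k :=
        mkS_getD _ _ _ (by omega)
      conv_lhs => rw [walkA]
      simp only [if_pos (by omega : 1 < k + 2), Nat.add_sub_cancel,
        (by omega : k + 2 - 1 = k + 1), h1, h2]
      rw [pw]
      by_cases hc : vlt (Sv prices (k+1)) (Sv prices k) = true
      · simp only [if_pos hc]
        rw [walkA_acc, List.reverse_append]
        have hih := ih (k+1) (by omega) (by omega)
        push_cast at hih ⊢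
        rw [show ((k:Int)+2-1) = (k:Int)+1 by ring]
        simp only [List.nil_append, List.reverse_cons, List.reverse_nil, List.nil_append]
        rw [List.append_assoc, ← hih, List.append_assoc]
      · simp only [if_neg hc]
        rw [walkA_acc, List.reverse_append]
        have hih := ih k (by omega) (by omega)
        push_cast at hih ⊢
        rw [show ((k:Int)+2-2) = (k:Int) by ring]
        simp only [List.nil_append, List.reverse_cons, List.reverse_nil, List.nil_append]
        rw [List.append_assoc, ← hih, List.append_assoc]

theorem foldB (prices : List Int) (k : Nat) (hk : 2 ≤ k) :
    (PySem.List.pyRange 3 ((k:Int)+1) 1).foldl (stepB prices)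
      (0, prices.getD 0 0, [(1:Int)], [(2:Int), 1])
    = ((Sv prices (k-1)).getD 0, (Sv prices k).getD 0,
       (pw prices (k-1)).reverse, (pw prices k).reverse) := by
  induction k, hk using Nat.le_induction with
  | base =>
    rw [show ((2:Nat):Int) + 1 = 3 by norm_num, PySem.List.pyRange_one_eq_nil (by norm_num)]
    simp [Sv, pw, vmin, vadd, vlt]
  | succ k hk ih =>
    obtain ⟨j, rfl⟩ : ∃ j, k = j + 1 := ⟨k - 1, by omega⟩
    have hr : PySem.List.pyRange 3 (((j+1+1:Nat):Int)+1) 1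
        = PySem.List.pyRange 3 (((j+1:Nat):Int)+1) 1 ++ [((j+1:Nat):Int)+1] := by
      rw [show (((j+1+1:Nat):Int)+1) = (((j+1:Nat):Int)+1) + 1 by push_cast; ring]
      exact PySem.List.pyRange_one_succ_right (by push_cast; omega)
    rw [hr, List.foldl_append, ih]
    simp only [List.foldl_cons, List.foldl_nil]
    have hj1 : 1 ≤ j := by omega
    have hsj : Sv prices j = some ((Sv prices j).getD 0) := Sv_some prices j hj1
    have hsj1 : Sv prices (j+1) = some ((Sv prices (j+1)).getD 0) :=
      Sv_some prices (j+1) (by omega)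
    have hidx : ((((j+1:Nat):Int)+1) - 2).toNat = j := by push_cast; omega
    have hS : Sv prices (j+2) =
        some (min ((Sv prices j).getD 0) ((Sv prices (j+1)).getD 0) + prices.getD j 0) := by
      rw [Sv, hsj, hsj1]; rfl
    simp only [stepB, hidx]
    simp only [show j+1-1 = j from rfl, show j+1+1-1 = j+1 by omega,
      show j+1+1 = j+2 by omega, Prod.mk.injEq]
    refine ⟨trivial, ?_, trivial, ?_⟩
    · rw [hS]; simp
    · conv_rhs => rw [pw]
      rw [hsj, hsj1]
      simp only [vlt]
      rw [show ((j+1:Nat):Int) + 1 = ((j:Nat):Int) + 2 by push_cast; ring]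
      by_cases hc : (Sv prices (j+1)).getD 0 < (Sv prices j).getD 0 <;>
        simp [hc, List.reverse_append]

-- ===== VERDICT (by name: the statement is the Claim_ definition above) =====
theorem chainRev_acc (l acc : List Int) :
    l.foldl (fun rev x => rev ++ [x]) acc = acc ++ l := by
  induction l generalizing acc with
  | nil => simp
  | cons x t ih => simp [List.foldl_cons, ih]

theorem grasshopter_spec : Claim_equal_grasshopter := by
  intro n prices _ _
  unfold Spec_grasshopter grasshopter grasshopter_alt
  by_cases h : n ≤ 1
  · simp [h]
  · simp only [if_neg h]
    set m := n.toNat with hm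
    have hmn : (m : Int) = n := Int.toNat_of_nonneg (by omega)
    have hm2 : 2 ≤ m := by omega
    have hSn : (mkS prices (m-1)).getD m none = Sv prices m :=
      mkS_getD _ _ _ (by omega)
    have hsome : Sv prices m = some ((Sv prices m).getD 0) := Sv_some prices m (by omega)
    rw [hSn, hsome]
    have hpath : (walkA (mkS prices (m-1)) m [n]).reverse = pw prices m := by
      rw [show ([n] : List Int) = [] ++ [(m:Int)] by simp [hmn]]
      rw [walkA_acc, List.reverse_append]
      simp only [List.reverse_cons, List.reverse_nil, List.nil_append]
      exact walkA_pw prices m m (le_refl m)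
    rw [hpath]
    have hfold := foldB prices m hm2
    rw [hmn] at hfold
    rw [hfold]
    simp only [chainRev, chainRev_acc, List.nil_append, List.reverse_reverse]
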